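-- pv_equiv track=rewrite | github.com/o-bscure/vim-schemes | seven/bags.py | findallholders
-- ===== SOURCE A (Python) =====
-- def findallholders(holdersOf, holdie):
--     winners = []
--
--     def findholders(holdie):
--         if holdie in list(holdersOf.keys()):
--             for holder in holdersOf[holdie]:
--                 if holder not in winners:
--                     winners.append(holder)
--                     findholders(holder)
--         else:
--             return
--
--     findholders(holdie)
--     return winners
-- ===== SOURCE B (Python) =====
-- def findallholders(holdersOf, holdie):
--     # Iterative DFS with an explicit stack of iterators instead of A's recursive
--     # nested function; same discovery (preorder) order and dedup-at-discovery.
--     winners = []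
--     stack = [iter(holdersOf.get(holdie, []))]
--     while stack:
--         frame = stack[-1]
--         for holder in frame:
--             if holder not in winners:
--                 winners.append(holder)
--                 stack.append(iter(holdersOf.get(holder, [])))
--                 break
--         else:
--             stack.pop()
--     return winners
-- ===== Notes on version B (the rewrite author's own statement) =====
-- stated objective: alternative
-- what changed: A's recursive nested-closure DFS is replaced by an iterative DFS that drives an explicit stack of pending holder-list iterators, preserving preorder discovery order and dedup-at-discovery.
import Mathlib
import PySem

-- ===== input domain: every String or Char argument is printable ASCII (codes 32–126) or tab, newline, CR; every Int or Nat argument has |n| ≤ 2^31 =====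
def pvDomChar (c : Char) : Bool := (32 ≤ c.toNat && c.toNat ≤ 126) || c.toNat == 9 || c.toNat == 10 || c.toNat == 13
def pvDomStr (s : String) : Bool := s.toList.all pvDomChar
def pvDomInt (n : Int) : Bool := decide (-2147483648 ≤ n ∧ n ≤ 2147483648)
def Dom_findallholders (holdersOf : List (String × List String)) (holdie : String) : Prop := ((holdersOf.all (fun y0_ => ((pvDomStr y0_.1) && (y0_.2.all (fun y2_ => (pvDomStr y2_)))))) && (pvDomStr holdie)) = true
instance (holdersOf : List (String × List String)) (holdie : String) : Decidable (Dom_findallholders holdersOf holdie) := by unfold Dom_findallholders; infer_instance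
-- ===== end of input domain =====

-- B replaces A's recursive nested DFS by an iterative DFS over an explicit stack of
-- pending holder lists (same discovery order, same dedup-at-discovery); return value only.

-- ===== PORT A =====
-- The fuel argument of findholdersA is a Lean termination artifact only: the top-level
-- call passes the number of distinct keys, which the equivalence proof shows is never
-- exhausted, so the fuel-out fallback branch is unreachable at the fuel used.
def findholdersA (d : PySem.Dict String (List String)) :
    Nat → List String → List String → List String
  | _, winners, [] => winners
  | f, winners, holder :: rest =>
    if holder ∈ winners then findholdersA d f winners rest
    else
      let w' := winners ++ [holder]
      -- recursive call findholders(holder): 'if holder in keys' then loop over holdersOf[holder]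
      let w'' := match d.get? holder with
        | none => w'                      -- holder not a key: the recursive call returns at once
        | some hs => match f with
          | 0 => w'                       -- fuel exhausted: unreachable at the fuel used
          | g + 1 => findholdersA d g w' hs
      findholdersA d f w'' rest
termination_by f _ hs => (f, hs.length)

def findallholders (holdersOf : List (String × List String)) (holdie : String) : List String :=
  let d := PySem.Dict.mk holdersOf
  match d.get? holdie with
  | none => []                     -- 'holdie in holdersOf.keys()' is false: winners stays []
  | some hs => findholdersA d ((holdersOf.map Prod.fst).dedup).length [] hs

-- ===== PORT B =====
-- helpers for loopB's termination measure (not part of the computed value)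
def pvRemKeys (d : PySem.Dict String (List String)) (w : List String) : List String :=
  d.keys.dedup.filter (fun k => k ∉ w)
def pvTotVal (d : PySem.Dict String (List String)) : Nat :=
  (d.keys.dedup.map (fun k => (d.getD k []).length)).sum

lemma pv_filter_unchanged {K w : List String} {h : String} (hK : h ∉ K) :
    K.filter (fun k => k ∉ w ++ [h]) = K.filter (fun k => k ∉ w) := by
  apply List.filter_congr
  intro x hx
  have hxh : x ≠ h := fun e => hK (e ▸ hx)
  simp [List.mem_append, hxh]

lemma pv_sum_filter_drop (f : String → Nat) :
    ∀ (K : List String) (w : List String) (h : String), K.Nodup → h ∈ K → h ∉ w →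
    ((K.filter (fun k => k ∉ w ++ [h])).map f).sum + f h
      = ((K.filter (fun k => k ∉ w)).map f).sum := by
  intro K
  induction K with
  | nil => intro w h _ hK _; cases hK
  | cons a K ih =>
    intro w h hnd hK hw
    simp only [List.filter_cons]
    rcases List.mem_cons.mp hK with rfl | hK'
    · have hnotin : h ∉ K := (List.nodup_cons.mp hnd).1
      have e1 : (decide (h ∉ w ++ [h])) = false := by simp
      have e2 : (decide (h ∉ w)) = true := by simpa using hw
      simp only [e1, e2, if_true, Bool.false_eq_true, if_false]
      rw [pv_filter_unchanged hnotin]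
      simp only [List.map_cons, List.sum_cons]
      omega
    · have hnd' := (List.nodup_cons.mp hnd).2
      have hah : a ≠ h := fun e => (List.nodup_cons.mp hnd).1 (e ▸ hK')
      by_cases haw : a ∈ w
      · have e1 : (decide (a ∉ w ++ [h])) = false := by simp [haw]
        have e2 : (decide (a ∉ w)) = false := by simpa using haw
        simp only [e1, e2, Bool.false_eq_true, if_false]
        exact ih w h hnd' hK' hw
      · have e1 : (decide (a ∉ w ++ [h])) = true := by simp [haw, hah]
        have e2 : (decide (a ∉ w)) = true := by simpa using haw
        simp only [e1, e2, if_true]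
        simp only [List.map_cons, List.sum_cons]
        rw [← ih w h hnd' hK' hw]
        omega

lemma pv_len_filter_drop :
    ∀ (K : List String) (w : List String) (h : String), K.Nodup → h ∈ K → h ∉ w →
    (K.filter (fun k => k ∉ w ++ [h])).length + 1
      = (K.filter (fun k => k ∉ w)).length := by
  intro K w h hnd hK hw
  have := pv_sum_filter_drop (fun _ => 1) K w h hnd hK hw
  simpa [List.map_const, List.sum_replicate] using this

lemma pv_remKeys_drop (d : PySem.Dict String (List String)) {w : List String} {h : String}
    (hK : h ∈ d.keys.dedup) (hw : h ∉ w) :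
    (pvRemKeys d (w ++ [h])).length + 1 = (pvRemKeys d w).length :=
  pv_len_filter_drop d.keys.dedup w h (List.nodup_dedup _) hK hw

lemma pv_remKeys_same (d : PySem.Dict String (List String)) {w : List String} {h : String}
    (hK : h ∉ d.keys.dedup) :
    pvRemKeys d (w ++ [h]) = pvRemKeys d w :=
  pv_filter_unchanged hK

lemma pv_val_le_tot (d : PySem.Dict String (List String)) {h : String}
    (hK : h ∈ d.keys.dedup) : (d.getD h []).length ≤ pvTotVal d :=
  List.single_le_sum (by intro x _; exact Nat.zero_le x) _
    (List.mem_map_of_mem hK)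

def loopB (d : PySem.Dict String (List String)) :
    List (List String) → List String → List String
  | [], winners => winners
  | [] :: rest, winners => loopB d rest winners          -- frame exhausted: pop
  | (holder :: frame) :: rest, winners =>
    if holder ∈ winners then loopB d (frame :: rest) winners
    else loopB d ((d.getD holder []) :: frame :: rest) (winners ++ [holder])
termination_by stack winners =>
  (pvRemKeys d winners).length * (2 * pvTotVal d + 2)
    + 2 * (stack.map List.length).sum + stack.length
decreasing_by
  all_goals simp only [List.map_cons, List.sum_cons, List.length_cons, List.length_nil]
  all_goals try omega
  all_goals
    rename_i hmem
    by_cases hK : holder ∈ d.keys.dedup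
    · have h1 := pv_remKeys_drop d hK hmem
      have h2 := pv_val_le_tot d hK
      have h4 : (pvRemKeys d winners).length * (2 * pvTotVal d + 2)
          = (pvRemKeys d (winners ++ [holder])).length * (2 * pvTotVal d + 2)
            + (2 * pvTotVal d + 2) := by rw [← h1]; ring
      omega
    · have h1 := pv_remKeys_same d (w := winners) hK
      have h0 : d.getD holder [] = [] :=
        PySem.Dict.getD_of_not_contains d [] (by
          rw [PySem.Dict.contains_eq_decide_mem_keys]
          simp only [decide_eq_false_iff_not]
          exact fun hm => hK (List.mem_dedup.mpr hm))
      rw [h1, h0]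
      simp only [List.length_nil]
      omega
def findallholders_alt (holdersOf : List (String × List String)) (holdie : String) : List String :=
  let d := PySem.Dict.mk holdersOf
  loopB d [d.getD holdie []] []

-- ===== PRECONDITION & SPEC =====
def Spec_findallholders (holdersOf : List (String × List String)) (holdie : String) (out : List String) : Prop := out = findallholders_alt holdersOf holdie
instance (holdersOf : List (String × List String)) (holdie : String) (out : List String) : Decidable (Spec_findallholders holdersOf holdie out) := by unfold Spec_findallholders; infer_instance

-- ===== CLAIM (what is proved, stated in full; the proofs are below) =====
def Claim_equal_findallholders : Prop := ∀ (holdersOf : List (String × List String)) (holdie : String), Dom_findallholders holdersOf holdie → Spec_findallholders holdersOf holdie (findallholders holdersOf holdie)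

-- ===== LEMMAS AND PROOFS =====

-- the winners list only grows
lemma findholdersA_mono (d : PySem.Dict String (List String)) :
    ∀ f hs w, w ⊆ findholdersA d f w hs := by
  intro f
  induction f with
  | zero =>
    intro hs
    induction hs with
    | nil => intro w; rw [findholdersA]; exact List.Subset.refl w
    | cons h t iht =>
      intro w
      rw [findholdersA]
      by_cases hmem : h ∈ w
      · simp only [if_pos hmem]; exact iht w
      · simp only [if_neg hmem]
        cases hq : d.get? h with
        | none =>
          exact List.Subset.trans (List.subset_append_left w [h]) (iht (w ++ [h]))
        | some hs' =>
          exact List.Subset.trans (List.subset_append_left w [h]) (iht (w ++ [h]))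
  | succ g ihf =>
    intro hs
    induction hs with
    | nil => intro w; rw [findholdersA]; exact List.Subset.refl w
    | cons h t iht =>
      intro w
      rw [findholdersA]
      by_cases hmem : h ∈ w
      · simp only [if_pos hmem]; exact iht w
      · simp only [if_neg hmem]
        cases hq : d.get? h with
        | none =>
          exact List.Subset.trans (List.subset_append_left w [h]) (iht (w ++ [h]))
        | some hs' =>
          refine List.Subset.trans (List.subset_append_left w [h]) ?_
          exact List.Subset.trans (ihf hs' (w ++ [h]))
            (iht (findholdersA d g (w ++ [h]) hs'))

lemma pv_remKeys_antitone (d : PySem.Dict String (List String)) {w w' : List String}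
    (hsub : w ⊆ w') : (pvRemKeys d w').length ≤ (pvRemKeys d w).length :=
  List.Sublist.length_le (List.monotone_filter_right _ (by
    intro k hk
    simp only [decide_eq_true_eq] at *
    exact fun hm => hk (hsub hm)))

-- the bridge: popping one stack frame of B equals running A's recursive scan of that frame
lemma pv_bridge (d : PySem.Dict String (List String)) :
    ∀ n hs w rest g, (pvRemKeys d w).length = n → n ≤ g →
      loopB d (hs :: rest) w = loopB d rest (findholdersA d g w hs) := by
  intro n
  induction n using Nat.strong_induction_on with
  | _ n IH =>
    intro hs
    induction hs with
    | nil =>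
      intro w rest g _ _
      rw [loopB, findholdersA]
    | cons h t IHt =>
      intro w rest g hn hg
      by_cases hmem : h ∈ w
      · rw [loopB]; simp only [if_pos hmem]
        rw [findholdersA]; simp only [if_pos hmem]
        exact IHt w rest g hn hg
      · rw [loopB]; simp only [if_neg hmem]
        rw [findholdersA]; simp only [if_neg hmem]
        by_cases hK : h ∈ d.keys.dedup
        · -- h is a key: both sides descend into its holder list
          have hdrop := pv_remKeys_drop d hK hmem
          have hn1 : 1 ≤ n := by
            have : h ∈ pvRemKeys d w := by
              unfold pvRemKeys; rw [List.mem_filter]; exact ⟨hK, by simpa using hmem⟩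
            have := List.length_pos_of_mem this
            omega
          obtain ⟨g', rfl⟩ : ∃ g', g = g' + 1 := ⟨g - 1, by omega⟩
          obtain ⟨hs, hget⟩ : ∃ hs, d.get? h = some hs := by
            cases hq : d.get? h with
            | none =>
              exact absurd (List.mem_dedup.mp hK)
                ((PySem.Dict.get?_eq_none_iff_not_mem_keys d h).mp hq)
            | some hs => exact ⟨hs, rfl⟩
          have hgd : d.getD h [] = hs := PySem.Dict.getD_of_get?_eq_some d [] hget
          rw [hgd, hget]
          have hstep1 : loopB d (hs :: t :: rest) (w ++ [h])
              = loopB d (t :: rest) (findholdersA d g' (w ++ [h]) hs) :=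
            IH (n - 1) (by omega) hs (w ++ [h]) (t :: rest) g' (by omega) (by omega)
          have hRlen : (pvRemKeys d (findholdersA d g' (w ++ [h]) hs)).length < n := by
            have h1 := pv_remKeys_antitone d (findholdersA_mono d g' hs (w ++ [h]))
            omega
          have hstep2 : loopB d (t :: rest) (findholdersA d g' (w ++ [h]) hs)
              = loopB d rest (findholdersA d (g' + 1) (findholdersA d g' (w ++ [h]) hs) t) :=
            IH _ hRlen t _ rest (g' + 1) rfl (by omega)
          exact hstep1.trans hstep2
        · -- h is not a key: B pushes an empty frame and pops it; A's inner call is a no-op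
          have hget : d.get? h = none := by
            rw [PySem.Dict.get?_eq_none_iff_not_mem_keys d h]
            exact fun hm => hK (List.mem_dedup.mpr hm)
          have hgd : d.getD h [] = [] := PySem.Dict.getD_of_get?_eq_none d [] hget
          rw [hgd, hget]
          have hsame := pv_remKeys_same d (w := w) hK
          rw [loopB]  -- pop the empty frame
          exact IHt (w ++ [h]) rest g (by rw [hsame]; exact hn) hg

-- ===== VERDICT (by name: the statement is the Claim_ definition above) =====
theorem findallholders_spec : Claim_equal_findallholders := by
  intro holdersOf holdie _
  unfold Spec_findallholders findallholders findallholders_alt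
  show (match (PySem.Dict.mk holdersOf).get? holdie with
      | none => []
      | some hs =>
        findholdersA (PySem.Dict.mk holdersOf) ((holdersOf.map Prod.fst).dedup).length [] hs)
    = loopB (PySem.Dict.mk holdersOf) [(PySem.Dict.mk holdersOf).getD holdie []] []
  cases hget : (PySem.Dict.mk holdersOf).get? holdie with
  | none =>
    rw [PySem.Dict.getD_of_get?_eq_none (PySem.Dict.mk holdersOf) [] hget]
    rw [loopB, loopB]
  | some hs =>
    rw [PySem.Dict.getD_of_get?_eq_some (PySem.Dict.mk holdersOf) [] hget]
    have hlen : (pvRemKeys (PySem.Dict.mk holdersOf) []).length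
        = ((holdersOf.map Prod.fst).dedup).length := by
      unfold pvRemKeys
      rw [PySem.Dict.keys_mk holdersOf]
      simp
    rw [pv_bridge (PySem.Dict.mk holdersOf) (pvRemKeys (PySem.Dict.mk holdersOf) []).length
      hs [] [] ((holdersOf.map Prod.fst).dedup).length rfl (le_of_eq hlen)]
    rw [loopB]
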